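-- pv_equiv track=rewrite | github.com/akhandsingh17/assignments | codingexercise/MaxDistance2OccurencesElementArray.py | MaxDistance2OccurencesElementArray
-- ===== SOURCE A (Python) =====
-- def MaxDistance2OccurencesElementArray(ary):
--
--     dict={}
--
--     for i in range(0,len(ary)):
--
--         key=ary[i]
--
--         if key in dict.keys():
--             dict[key].append(i)
--         else:
--             tmp=[]
--             tmp.append(i)
--             dict[key]=tmp
--
--     fnl_lst=[]
--
--     for key,val in dict.items():
--         tup=(key,val[len(val)-1]-val[0])
--         fnl_lst.append(tup)
--
--     return sorted(fnl_lst,key=lambda x:x[1],reverse=True)[0]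
-- ===== SOURCE B (Python) =====
-- def MaxDistance2OccurencesElementArray(ary):
--     first = {}
--     best_key, best_d = ary[0], 0
--     for i, x in enumerate(ary):
--         if x in first:
--             d = i - first[x]
--             if d > best_d:
--                 best_key, best_d = x, d
--         else:
--             first[x] = i
--     return (best_key, best_d)
-- ===== Notes on version B (the rewrite author's own statement) =====
-- stated objective: faster
-- what changed: Replaces the dict-of-all-occurrence-lists plus final sort with a single pass that stores only each element's first index and tracks the best (key, last-first distance) with a strict comparison, which reproduces the sort's earliest-first tie-break.
import Mathlib
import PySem

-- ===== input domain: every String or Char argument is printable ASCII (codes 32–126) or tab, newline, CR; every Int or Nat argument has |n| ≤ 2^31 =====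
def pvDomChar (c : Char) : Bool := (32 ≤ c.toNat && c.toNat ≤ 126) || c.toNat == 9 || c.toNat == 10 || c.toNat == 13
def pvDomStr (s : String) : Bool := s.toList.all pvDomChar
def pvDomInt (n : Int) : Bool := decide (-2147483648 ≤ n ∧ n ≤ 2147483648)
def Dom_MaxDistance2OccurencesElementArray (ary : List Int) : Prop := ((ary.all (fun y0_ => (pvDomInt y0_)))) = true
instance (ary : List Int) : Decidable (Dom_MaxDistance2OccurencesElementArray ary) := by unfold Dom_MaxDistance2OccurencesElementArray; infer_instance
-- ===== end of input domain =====

-- B replaces A's dict of all occurrence lists plus a final sort by a single pass that keeps only each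
-- element's first index and tracks the best (key, distance) pair (objective: faster).

-- ===== PORT A =====
def MaxDistance2OccurencesElementArray (ary : List Int) : Int × Int :=
  let d :=
    (PySem.List.pyRange 0 (PySem.List.len ary) 1).foldl
      (fun (d : PySem.Dict Int (List Int)) i =>
        let key := PySem.List.pyGetD ary i 0
        if d.contains key then d.modify key [] (fun v => v ++ [i])
        else d.insert key [i])
      PySem.Dict.empty
  let fnl :=
    d.items.foldl
      (fun acc p =>
        acc ++ [(p.1, PySem.List.pyGetD p.2 (PySem.List.len p.2 - 1) 0 - PySem.List.pyGetD p.2 0 0)])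
      []
  PySem.List.pyGetD (PySem.List.sorted fnl (fun x => x.2) true) 0 (0, 0)

-- ===== PORT B =====
-- the loop body of B's single pass (named so the invariant lemmas can mention it)
def pvBStep (st : PySem.Dict Int Int × Int × Int) (p : Int × Int) : PySem.Dict Int Int × Int × Int :=
  if st.1.contains p.2 then
    let d := p.1 - st.1.getD p.2 0
    if st.2.2 < d then (st.1, p.2, d) else st
  else (st.1.insert p.2 p.1, st.2.1, st.2.2)

def MaxDistance2OccurencesElementArray_alt (ary : List Int) : Int × Int :=
  let st :=
    (PySem.List.enumerate ary).foldl pvBStep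
      (PySem.Dict.empty, PySem.List.pyGetD ary 0 0, 0)
  (st.2.1, st.2.2)

-- ===== PRECONDITION & SPEC =====
-- Pre_ excludes only the empty list, on which A raises IndexError (indexing the sorted list); B raises there too (first-element read).
def Pre_MaxDistance2OccurencesElementArray (ary : List Int) : Prop := ary ≠ []
instance (ary : List Int) : Decidable (Pre_MaxDistance2OccurencesElementArray ary) := by unfold Pre_MaxDistance2OccurencesElementArray; infer_instance
def pvWitness_MaxDistance2OccurencesElementArray : List Int := [1, 2, 1]
def Spec_MaxDistance2OccurencesElementArray (ary : List Int) (out : Int × Int) : Prop := out = MaxDistance2OccurencesElementArray_alt ary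
instance (ary : List Int) (out : Int × Int) : Decidable (Spec_MaxDistance2OccurencesElementArray ary out) := by unfold Spec_MaxDistance2OccurencesElementArray; infer_instance

-- ===== CLAIM (what is proved, stated in full; the proofs are below) =====
def Claim_equal_MaxDistance2OccurencesElementArray : Prop := ∀ (ary : List Int), Dom_MaxDistance2OccurencesElementArray ary → Pre_MaxDistance2OccurencesElementArray ary → Spec_MaxDistance2OccurencesElementArray ary (MaxDistance2OccurencesElementArray ary)

-- ===== LEMMAS AND PROOFS =====
def pvOcc (l : List Int) (k : Int) : List Int :=
  ((PySem.List.enumerate l).filter (fun p => p.2 == k)).map (fun p => p.1)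

lemma pvOcc_append (l : List Int) (x k : Int) :
    pvOcc (l ++ [x]) k = pvOcc l k ++ (if x == k then [(l.length : Int)] else []) := by
  by_cases h : x = k
  · subst h; simp [pvOcc, PySem.List.enumerate_append, PySem.List.enumerate]
  · simp [pvOcc, PySem.List.enumerate_append, PySem.List.enumerate, h]

lemma pvOcc_eq_nil_iff (l : List Int) (k : Int) : pvOcc l k = [] ↔ k ∉ l := by
  rw [pvOcc]
  simp only [List.map_eq_nil_iff, List.filter_eq_nil_iff]
  constructor
  · intro hf hk
    have : k ∈ (PySem.List.enumerate l).map (fun p => p.2) := by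
      rw [PySem.List.map_snd_enumerate]; exact hk
    obtain ⟨p, hp, hpk⟩ := List.mem_map.1 this
    exact hf p hp (by simp [hpk])
  · intro hk p hp hb
    apply hk
    have : p.2 = k := by simpa using hb
    rw [← this, ← PySem.List.map_snd_enumerate l 0]
    exact List.mem_map_of_mem hp

lemma pvOcc_mem_bound (l : List Int) (k e : Int) (he : e ∈ pvOcc l k) :
    0 ≤ e ∧ e < (l.length : Int) := by
  obtain ⟨p, hp, rfl⟩ := List.mem_map.1 he
  have hp' := (List.mem_filter.1 hp).1
  obtain ⟨j, hj, rfl⟩ := (PySem.List.mem_enumerate_iff l 0 p).1 hp'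
  simp; omega

lemma pvOcc_pairwise (l : List Int) (k : Int) : (pvOcc l k).Pairwise (· < ·) := by
  exact List.pairwise_map.2 ((PySem.List.pairwise_lt_enumerate l 0).filter _)

lemma pvFirst_mem (l : List Int) (k : Int) (h : pvOcc l k ≠ []) : (pvOcc l k).headD 0 ∈ pvOcc l k := by
  obtain ⟨a, t, h'⟩ := List.exists_cons_of_ne_nil h
  rw [h']; simp

lemma pvLast_mem (l : List Int) (k : Int) (h : pvOcc l k ≠ []) : (pvOcc l k).getLastD 0 ∈ pvOcc l k := by
  obtain ⟨a, t, h'⟩ := List.exists_cons_of_ne_nil h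
  rw [h', List.getLastD_eq_getLast?, List.getLast?_eq_some_getLast (by simp), Option.getD_some]
  exact List.getLast_mem _

lemma pvFirst_le_last (l : List Int) (k : Int) (h : pvOcc l k ≠ []) :
    (pvOcc l k).headD 0 ≤ (pvOcc l k).getLastD 0 := by
  obtain ⟨a, t, h'⟩ := List.exists_cons_of_ne_nil h
  have hp := pvOcc_pairwise l k
  rw [h'] at hp ⊢
  rw [List.getLastD_eq_getLast?, List.getLast?_eq_some_getLast (by simp), Option.getD_some]
  have hm := List.getLast_mem (l := a :: t) (by simp)
  rcases List.mem_cons.1 hm with he | ht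
  · rw [List.headD_cons, he]
  · have hlt := (List.pairwise_cons.1 hp).1 _ ht
    rw [List.headD_cons]
    omega

lemma pvHeadD_append {α : Type} (a b : List α) (d : α) (h : a ≠ []) : (a ++ b).headD d = a.headD d := by
  cases a with
  | nil => exact absurd rfl h
  | cons x t => simp

lemma pvSet_append (l : List Int) (x : Int) :
    PySem.Set.ofList (l ++ [x]) =
      if x ∈ l then PySem.Set.ofList l else PySem.Set.ofList l ++ [x] := by
  have h1 : PySem.Set.ofList (l ++ [x]) = PySem.Set.add (PySem.Set.ofList l) x := by
    simp [PySem.Set.ofList, List.foldl_append]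
  rw [h1, PySem.Set.add]
  by_cases hx : x ∈ l
  · rw [if_pos (by simp [PySem.Set.mem_ofList, hx]), if_pos hx]
  · rw [if_neg (by simp [PySem.Set.mem_ofList, hx]), if_neg hx]

lemma pvFoldl_add_prefix (rest : List Int) : ∀ acc : List Int,
    ∃ t, List.foldl PySem.Set.add acc rest = acc ++ t := by
  induction rest with
  | nil => intro acc; exact ⟨[], by simp⟩
  | cons y r ih =>
    intro acc
    simp only [List.foldl_cons]
    obtain ⟨t, ht⟩ := ih (PySem.Set.add acc y)
    by_cases hc : PySem.Set.contains acc y = true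
    · have hay : PySem.Set.add acc y = acc := by rw [PySem.Set.add, if_pos hc]
      rw [hay] at ht ⊢
      exact ⟨t, ht⟩
    · refine ⟨[y] ++ t, ?_⟩
      rw [ht, PySem.Set.add, if_neg hc, List.append_assoc]

lemma pvSet_cons_ex (a : Int) (rest : List Int) :
    ∃ t, PySem.Set.ofList (a :: rest) = a :: t := by
  obtain ⟨t, ht⟩ := pvFoldl_add_prefix rest [a]
  refine ⟨t, ?_⟩
  rw [PySem.Set.ofList]
  simp only [List.foldl_cons]
  have : PySem.Set.add PySem.Set.empty a = [a] := by
    simp [PySem.Set.add, PySem.Set.empty]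
  rw [this] at *
  simpa using ht

def pvFirst (l : List Int) (k : Int) : Int := (pvOcc l k).headD 0
def pvLast (l : List Int) (k : Int) : Int := (pvOcc l k).getLastD 0
def pvDist (l : List Int) (k : Int) : Int := pvLast l k - pvFirst l k

lemma pvOcc_ne_nil_of_mem (l : List Int) (k : Int) (h : k ∈ l) : pvOcc l k ≠ [] := by
  intro hc; exact (pvOcc_eq_nil_iff l k).1 hc h

lemma pvFirst_append_of_mem (l : List Int) (x k : Int) (h : k ∈ l) :
    pvFirst (l ++ [x]) k = pvFirst l k := by
  by_cases hxk : x = k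
  · subst hxk
    have hne : pvOcc l x ≠ [] := pvOcc_ne_nil_of_mem l x h
    rw [pvFirst, pvOcc_append, if_pos (by simp), pvHeadD_append _ _ _ hne, pvFirst]
  · rw [pvFirst, pvOcc_append, if_neg (by simp [hxk]), List.append_nil, pvFirst]

lemma pvFirst_bound (l : List Int) (k : Int) (h : k ∈ l) :
    0 ≤ pvFirst l k ∧ pvFirst l k < (l.length : Int) := by
  exact pvOcc_mem_bound l k _ (pvFirst_mem l k (pvOcc_ne_nil_of_mem l k h))

lemma pvLast_bound (l : List Int) (k : Int) (h : k ∈ l) :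
    0 ≤ pvLast l k ∧ pvLast l k < (l.length : Int) := by
  exact pvOcc_mem_bound l k _ (pvLast_mem l k (pvOcc_ne_nil_of_mem l k h))

lemma pvFirst_append_self_of_not_mem (l : List Int) (x : Int) (h : x ∉ l) :
    pvFirst (l ++ [x]) x = (l.length : Int) := by
  have : pvOcc l x = [] := (pvOcc_eq_nil_iff l x).2 h
  rw [pvFirst, pvOcc_append, if_pos (by simp), this]
  simp

lemma pvSet_pairwise_first (l : List Int) :
    (PySem.Set.ofList l).Pairwise (fun a b => pvFirst l a < pvFirst l b) := by
  induction l using List.reverseRecOn with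
  | nil => simp [PySem.Set.ofList, PySem.Set.empty]
  | append_singleton ys x ih =>
    rw [pvSet_append]
    by_cases hx : x ∈ ys
    · rw [if_pos hx]
      refine ih.imp_of_mem ?_
      intro a b ha hb hab
      have ha' : a ∈ ys := (PySem.Set.mem_ofList ys a).1 ha
      have hb' : b ∈ ys := (PySem.Set.mem_ofList ys b).1 hb
      rwa [pvFirst_append_of_mem ys x a ha', pvFirst_append_of_mem ys x b hb']
    · rw [if_neg hx]
      rw [List.pairwise_append]
      refine ⟨?_, by simp, ?_⟩
      · refine ih.imp_of_mem ?_
        intro a b ha hb hab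
        have ha' : a ∈ ys := (PySem.Set.mem_ofList ys a).1 ha
        have hb' : b ∈ ys := (PySem.Set.mem_ofList ys b).1 hb
        rwa [pvFirst_append_of_mem ys x a ha', pvFirst_append_of_mem ys x b hb']
      · intro a ha b hb
        have ha' : a ∈ ys := (PySem.Set.mem_ofList ys a).1 ha
        have hb' : b = x := by simpa using hb
        rw [hb', pvFirst_append_of_mem ys x a ha', pvFirst_append_self_of_not_mem ys x hx]
        exact (pvFirst_bound ys a ha').2

def pvFnl (l : List Int) : List (Int × Int) :=
  (PySem.Set.ofList l).map (fun k => (k, pvDist l k))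
def pvStep (b p : Int × Int) : Int × Int := if b.2 < p.2 then p else b


lemma pvGetD_last (v : List Int) (hv : v ≠ []) :
    PySem.List.pyGetD v (PySem.List.len v - 1) 0 = v.getLastD 0 := by
  have hlen : 0 < v.length := List.length_pos_iff.2 hv
  rw [PySem.List.len_eq, PySem.List.pyGetD_eq_getElem v 0 (by omega) (by omega)]
  rw [List.getLastD_eq_getLast?, List.getLast?_eq_some_getLast hv, Option.getD_some,
    List.getLast_eq_getElem]
  congr 1
  omega

lemma pvGetD_head (v : List Int) : PySem.List.pyGetD v 0 0 = v.headD 0 := by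
  rw [PySem.List.pyGetD_zero]
  cases v <;> simp

-- the dict A builds, characterised
lemma pvA_dict :
    ∀ ary : List Int,
    (PySem.List.pyRange 0 (PySem.List.len ary) 1).foldl
      (fun (d : PySem.Dict Int (List Int)) i =>
        let key := PySem.List.pyGetD ary i 0
        if d.contains key then d.modify key [] (fun v => v ++ [i])
        else d.insert key [i])
      PySem.Dict.empty
    = ((PySem.List.enumerate ary).map (fun p => (p.2, p.1))).foldl
        (fun d p => d.modify p.1 [] (fun v => v ++ [p.2])) PySem.Dict.empty := by
  intro ary
  have hbody : (fun (d : PySem.Dict Int (List Int)) (i : Int) =>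
      let key := PySem.List.pyGetD ary i 0
      if d.contains key then d.modify key [] (fun v => v ++ [i])
      else d.insert key [i])
      = fun d i => d.modify (PySem.List.pyGetD ary i 0) [] (fun v => v ++ [i]) := by
    funext d i
    by_cases hc : d.contains (PySem.List.pyGetD ary i 0) = true
    · simp [hc]
    · have hc' : d.contains (PySem.List.pyGetD ary i 0) = false := by
        simpa using hc
      simp [hc', PySem.Dict.modify, PySem.Dict.getD_of_not_contains d [] hc']
  rw [hbody, PySem.List.enumerate_eq_map_pyRange ary 0, List.map_map, List.foldl_map]
  rfl

lemma pvA_getD (ary : List Int) (k : Int) :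
    (((PySem.List.enumerate ary).map (fun p => (p.2, p.1))).foldl
        (fun d p => d.modify p.1 [] (fun v => v ++ [p.2])) PySem.Dict.empty).getD k []
    = pvOcc ary k := by
  rw [PySem.Dict.getD_foldl_modify_append]
  rw [PySem.Dict.getD_empty]
  rw [List.filter_map, List.map_map]
  rfl

lemma pvA_keys (ary : List Int) :
    (((PySem.List.enumerate ary).map (fun p => (p.2, p.1))).foldl
        (fun d p => d.modify p.1 [] (fun v => v ++ [p.2])) PySem.Dict.empty).keys
    = PySem.Set.ofList ary := by
  have h := PySem.Dict.keys_foldl_modify_key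
      ((PySem.List.enumerate ary).map (fun p => (p.2, p.1))) Prod.fst []
      (fun _ p => fun v => v ++ [p.2]) PySem.Dict.empty
  simp only [PySem.Dict.keys_empty] at h
  rw [h, List.map_map]
  have : ((PySem.List.enumerate ary).map (Prod.fst ∘ fun p => (p.2, p.1)))
      = ary := by
    rw [show (Prod.fst ∘ fun (p : Int × Int) => (p.2, p.1)) = fun p => p.2 from rfl]
    exact PySem.List.map_snd_enumerate ary 0
  rw [this, PySem.Set.update, PySem.Set.ofList]
  rfl

lemma pvA_nodup (ary : List Int) :
    (((PySem.List.enumerate ary).map (fun p => (p.2, p.1))).foldl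
        (fun d p => d.modify p.1 [] (fun v => v ++ [p.2])) PySem.Dict.empty).keys.Nodup := by
  exact PySem.Dict.nodup_keys_foldl_modify_key _ Prod.fst []
    (fun _ p => fun v => v ++ [p.2]) _ (by simp [PySem.Dict.keys_empty])

lemma pvA_items (ary : List Int) :
    (((PySem.List.enumerate ary).map (fun p => (p.2, p.1))).foldl
        (fun d p => d.modify p.1 [] (fun v => v ++ [p.2])) PySem.Dict.empty).items
    = (PySem.Set.ofList ary).map (fun k => (k, pvOcc ary k)) := by
  rw [PySem.Dict.items_eq_map_keys _ (pvA_nodup ary) []]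
  rw [pvA_keys]
  exact List.map_congr_left (fun k _ => by rw [pvA_getD])

lemma pvHead_foldl_insertBy (t : List (Int × Int)) :
    ∀ (a : Int × Int) (acc : List (Int × Int)),
      (t.foldl (fun acc x => PySem.List.insertBy (fun p q => decide (q.2 < p.2)) x acc) (a :: acc)).headD (0, 0)
        = t.foldl pvStep a := by
  induction t with
  | nil => intro a acc; rfl
  | cons x t ih =>
    intro a acc
    simp only [List.foldl_cons, PySem.List.insertBy, pvStep]
    by_cases h : a.2 < x.2
    · simp only [h, decide_true, if_pos]
      exact ih x (a :: acc)
    · simp only [h, decide_false]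
      exact ih a _

lemma pvDist_nonneg (l : List Int) (k : Int) (h : k ∈ l) : 0 ≤ pvDist l k := by
  have := pvFirst_le_last l k (pvOcc_ne_nil_of_mem l k h)
  simp only [pvDist, pvFirst, pvLast]
  omega

lemma pvA_eq_pick (ary : List Int) (h : ary ≠ []) :
    MaxDistance2OccurencesElementArray ary = (pvFnl ary).foldl pvStep (ary.headD 0, 0) := by
  obtain ⟨a0, t0, rfl⟩ := List.exists_cons_of_ne_nil h
  rw [MaxDistance2OccurencesElementArray]
  simp only [pvA_dict, pvA_items]
  have hmap := PySem.List.foldl_append_singleton_eq_map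
    (f := fun p : Int × List Int =>
      (p.1, PySem.List.pyGetD p.2 (PySem.List.len p.2 - 1) 0 - PySem.List.pyGetD p.2 0 0))
    (l := (PySem.Set.ofList (a0 :: t0)).map (fun k => (k, pvOcc (a0 :: t0) k))) (acc := [])
  rw [hmap, List.nil_append, List.map_map]
  have hfnl : ((PySem.Set.ofList (a0 :: t0)).map
      ((fun p => (p.1, PySem.List.pyGetD p.2 (PySem.List.len p.2 - 1) 0 - PySem.List.pyGetD p.2 0 0))
        ∘ (fun k => (k, pvOcc (a0 :: t0) k))))
      = pvFnl (a0 :: t0) := by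
    rw [pvFnl]
    refine List.map_congr_left ?_
    intro k hk
    have hk' : k ∈ (a0 :: t0) := (PySem.Set.mem_ofList _ k).1 hk
    have hne : pvOcc (a0 :: t0) k ≠ [] := pvOcc_ne_nil_of_mem _ k hk'
    simp only [Function.comp]
    rw [pvGetD_last _ hne, pvGetD_head]
    rfl
  rw [hfnl]
  obtain ⟨s, hs⟩ := pvSet_cons_ex a0 t0
  have hfnl2 : pvFnl (a0 :: t0) = (a0, pvDist (a0 :: t0) a0) :: s.map (fun k => (k, pvDist (a0 :: t0) k)) := by
    rw [pvFnl, hs, List.map_cons]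
  rw [hfnl2, PySem.List.sorted_rev_eq_foldl_insertBy, List.foldl_cons]
  have hins : PySem.List.insertBy (fun a b => decide ((fun x : Int × Int => x.2) b < (fun x : Int × Int => x.2) a))
      (a0, pvDist (a0 :: t0) a0) [] = [(a0, pvDist (a0 :: t0) a0)] := rfl
  rw [hins]
  rw [PySem.List.pyGetD_zero]
  have hd0 : 0 ≤ pvDist (a0 :: t0) a0 := pvDist_nonneg _ a0 (by simp)
  have hgoal := pvHead_foldl_insertBy (s.map (fun k => (k, pvDist (a0 :: t0) k)))
    (a0, pvDist (a0 :: t0) a0) []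
  have hgd : ∀ xs : List (Int × Int), xs.getD 0 (0,0) = xs.headD (0,0) := by
    intro xs; cases xs <;> simp
  rw [hgd, hgoal]
  rw [List.foldl_cons]
  have hstep : pvStep ((a0 :: t0).headD 0, 0) (a0, pvDist (a0 :: t0) a0) = (a0, pvDist (a0 :: t0) a0) := by
    simp only [pvStep, List.headD_cons]
    by_cases h0 : (0 : Int) < pvDist (a0 :: t0) a0
    · rw [if_pos h0]
    · rw [if_neg h0]
      have : pvDist (a0 :: t0) a0 = 0 := by omega
      rw [this]
  rw [hstep]

lemma pvPick_keep (S : List (Int × Int)) (b : Int × Int) (h : ∀ p ∈ S, p.2 ≤ b.2) :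
    S.foldl pvStep b = b := by
  induction S with
  | nil => rfl
  | cons p t ih =>
    have h1 : p.2 ≤ b.2 := h p (by simp)
    have hs : pvStep b p = b := by
      simp only [pvStep]
      rw [if_neg (by omega)]
    simp only [List.foldl_cons, hs]
    exact ih (fun q hq => h q (by simp [hq]))

lemma pvPick_lt (P : List (Int × Int)) : ∀ (b : Int × Int) (c : Int),
    b.2 < c → (∀ p ∈ P, p.2 < c) → (P.foldl pvStep b).2 < c := by
  induction P with
  | nil => intro b c hb _; exact hb
  | cons p t ih =>
    intro b c hb h
    simp only [List.foldl_cons]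
    apply ih
    · simp only [pvStep]
      split_ifs
      · exact h p (by simp)
      · exact hb
    · exact fun q hq => h q (by simp [hq])

lemma pvPick_of_decomp (ary : List Int) (bk bd : Int) (K1 K2 : List Int)
    (h : ary ≠ []) (hset : PySem.Set.ofList ary = K1 ++ bk :: K2)
    (h1 : ∀ k ∈ K1, pvDist ary k < bd) (hbk : pvDist ary bk = bd)
    (h2 : ∀ k ∈ K2, pvDist ary k ≤ bd) (hbd : 0 ≤ bd) :
    (pvFnl ary).foldl pvStep (ary.headD 0, 0) = (bk, bd) := by
  have hfnl : pvFnl ary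
      = K1.map (fun k => (k, pvDist ary k)) ++ (bk, bd) :: K2.map (fun k => (k, pvDist ary k)) := by
    rw [pvFnl, hset, List.map_append, List.map_cons, hbk]
  rw [hfnl, List.foldl_append, List.foldl_cons]
  rcases lt_or_eq_of_le hbd with hpos | hzero
  · have hr : ((K1.map (fun k => (k, pvDist ary k))).foldl pvStep (ary.headD 0, 0)).2 < bd := by
      apply pvPick_lt
      · exact hpos
      · intro p hp
        obtain ⟨k, hk, rfl⟩ := List.mem_map.1 hp
        exact h1 k hk
    have hstep : pvStep ((K1.map (fun k => (k, pvDist ary k))).foldl pvStep (ary.headD 0, 0)) (bk, bd)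
        = (bk, bd) := by
      simp only [pvStep]
      rw [if_pos hr]
    rw [hstep]
    apply pvPick_keep
    intro p hp
    obtain ⟨k, hk, rfl⟩ := List.mem_map.1 hp
    exact h2 k hk
  · -- bd = 0: every distance is ≥ 0, so K1 is empty and bk is the head of the set
    have hK1 : K1 = [] := by
      cases K1 with
      | nil => rfl
      | cons a t =>
        exfalso
        have ha : a ∈ PySem.Set.ofList ary := by rw [hset]; simp
        have ha' : a ∈ ary := (PySem.Set.mem_ofList ary a).1 ha
        have := pvDist_nonneg ary a ha'
        have := h1 a (by simp)
        omega
    subst hK1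
    obtain ⟨a0, t0, rfl⟩ := List.exists_cons_of_ne_nil h
    obtain ⟨s, hs⟩ := pvSet_cons_ex a0 t0
    rw [hs] at hset
    simp only [List.nil_append] at hset
    injection hset with hbk0 hsK
    have hstep : pvStep ((a0 :: t0).headD 0, 0) (bk, bd) = ((a0 :: t0).headD 0, 0) := by
      simp only [pvStep]
      rw [if_neg (by omega)]
    rw [List.map_nil, List.foldl_nil, hstep]
    have hinit : ((a0 :: t0).headD 0, (0 : Int)) = (bk, bd) := by
      rw [List.headD_cons, hbk0, ← hzero]
    rw [hinit]
    apply pvPick_keep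
    intro p hp
    obtain ⟨k, hk, rfl⟩ := List.mem_map.1 hp
    have := h2 k hk
    simpa using by omega

lemma pvDist_def (l : List Int) (k : Int) : pvDist l k = pvLast l k - pvFirst l k := rfl

lemma pvOcc_append_of_ne (l : List Int) (x k : Int) (h : x ≠ k) :
    pvOcc (l ++ [x]) k = pvOcc l k := by
  rw [pvOcc_append, if_neg (by simp [h]), List.append_nil]

lemma pvDist_append_of_ne (l : List Int) (x k : Int) (h : x ≠ k) :
    pvDist (l ++ [x]) k = pvDist l k := by
  simp only [pvDist, pvFirst, pvLast, pvOcc_append_of_ne l x k h]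

lemma pvLast_append_self (l : List Int) (x : Int) :
    pvLast (l ++ [x]) x = (l.length : Int) := by
  rw [pvLast, pvOcc_append, if_pos (by simp)]
  simp

lemma pvDist_append_self_of_mem (l : List Int) (x : Int) (h : x ∈ l) :
    pvDist (l ++ [x]) x = (l.length : Int) - pvFirst l x := by
  rw [pvDist_def, pvLast_append_self]
  rw [show pvFirst (l ++ [x]) x = pvFirst l x from pvFirst_append_of_mem l x x h]

lemma pvOcc_append_self_of_not_mem (l : List Int) (x : Int) (h : x ∉ l) :
    pvOcc (l ++ [x]) x = [(l.length : Int)] := by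
  have hnil : pvOcc l x = [] := (pvOcc_eq_nil_iff l x).2 h
  rw [pvOcc_append, if_pos (by simp), hnil, List.nil_append]

lemma pvDist_append_self_of_not_mem (l : List Int) (x : Int) (h : x ∉ l) :
    pvDist (l ++ [x]) x = 0 := by
  rw [pvDist_def, pvLast, pvFirst, pvOcc_append_self_of_not_mem l x h]
  simp


lemma pvHead?_getD {α : Type} (l : List α) (d : α) : l.head?.getD d = l.headD d := by
  cases l <;> rfl

lemma pvHead?_append_left {α : Type} (a b : List α) (h : a ≠ []) : (a ++ b).head? = a.head? := by
  cases a with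
  | nil => exact absurd rfl h
  | cons x t => rfl

lemma pvB_inv (l : List Int) (a0 : Int) (h : l ≠ []) (ha : l.headD 0 = a0) :
    (∀ k, ((PySem.List.enumerate l).foldl pvBStep (PySem.Dict.empty, a0, 0)).1.get? k = (pvOcc l k).head?) ∧
    0 ≤ ((PySem.List.enumerate l).foldl pvBStep (PySem.Dict.empty, a0, 0)).2.2 ∧
    ∃ K1 K2, PySem.Set.ofList l
        = K1 ++ ((PySem.List.enumerate l).foldl pvBStep (PySem.Dict.empty, a0, 0)).2.1 :: K2 ∧
      (∀ k ∈ K1, pvDist l k < ((PySem.List.enumerate l).foldl pvBStep (PySem.Dict.empty, a0, 0)).2.2) ∧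
      pvDist l ((PySem.List.enumerate l).foldl pvBStep (PySem.Dict.empty, a0, 0)).2.1
        = ((PySem.List.enumerate l).foldl pvBStep (PySem.Dict.empty, a0, 0)).2.2 ∧
      (∀ k ∈ K2, pvDist l k ≤ ((PySem.List.enumerate l).foldl pvBStep (PySem.Dict.empty, a0, 0)).2.2) := by
  induction l using List.reverseRecOn with
  | nil => exact absurd rfl h
  | append_singleton ys x ih =>
    by_cases hys : ys = []
    · subst hys
      simp only [List.nil_append, List.headD_cons] at ha ⊢
      subst ha
      have hstate : (PySem.List.enumerate [x]).foldl pvBStep (PySem.Dict.empty, x, 0)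
          = (PySem.Dict.empty.insert x 0, x, 0) := by
        simp [PySem.List.enumerate, pvBStep, PySem.Dict.contains_empty]
      rw [hstate]
      refine ⟨?_, le_refl 0, [], [], ?_, by simp, ?_, by simp⟩
      · intro k
        by_cases hk : k = x
        · subst hk
          rw [PySem.Dict.get?_insert_self]
          simp [pvOcc, PySem.List.enumerate]
        · rw [PySem.Dict.get?_insert_of_ne _ _ hk]
          rw [PySem.Dict.get?_empty]
          simp [pvOcc, PySem.List.enumerate, Ne.symm hk]
      · simp [PySem.Set.ofList, PySem.Set.add, PySem.Set.empty]
      · simp [pvDist, pvFirst, pvLast, pvOcc, PySem.List.enumerate]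
    · -- inductive step: ys ≠ []
      have ha' : ys.headD 0 = a0 := by
        rw [← ha, pvHeadD_append _ _ _ hys]
      obtain ⟨ihH1, ihbd, K1, K2, hset, h1, hbk, h2⟩ := ih hys ha'
      set sty := (PySem.List.enumerate ys).foldl pvBStep (PySem.Dict.empty, a0, 0) with hsty
      have hen : PySem.List.enumerate (ys ++ [x])
          = PySem.List.enumerate ys ++ [((ys.length : Int), x)] := by
        rw [PySem.List.enumerate_append]
        simp [PySem.List.enumerate]
      have hst : (PySem.List.enumerate (ys ++ [x])).foldl pvBStep (PySem.Dict.empty, a0, 0)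
          = pvBStep sty ((ys.length : Int), x) := by
        rw [hen, List.foldl_append]
        rfl
      have hbk_mem : sty.2.1 ∈ ys := by
        have : sty.2.1 ∈ PySem.Set.ofList ys := by rw [hset]; simp
        exact (PySem.Set.mem_ofList _ _).1 this
      rw [hst]
      by_cases hx : x ∈ ys
      · -- x seen before
        have hocc_ne : pvOcc ys x ≠ [] := pvOcc_ne_nil_of_mem ys x hx
        have hcont : sty.1.contains x = true := by
          rw [PySem.Dict.contains_eq_isSome_get?, ihH1 x]
          cases h' : pvOcc ys x with
          | nil => exact absurd h' hocc_ne
          | cons a t => simp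
        have hfirstD : sty.1.getD x 0 = pvFirst ys x := by
          rw [PySem.Dict.getD_eq_get?_getD, ihH1 x, pvHead?_getD]
          rfl
        have hH1' : ∀ k, sty.1.get? k = (pvOcc (ys ++ [x]) k).head? := by
          intro k
          by_cases hk : k = x
          · subst hk
            rw [ihH1 k, pvOcc_append, if_pos (by simp), pvHead?_append_left _ _ hocc_ne]
          · rw [ihH1 k, pvOcc_append_of_ne ys x k (fun h' => hk h'.symm)]
        have hfo := pvFirst_bound ys x hx
        have hlastb := pvLast_bound ys x hx
        have hdx : pvDist (ys ++ [x]) x = (ys.length : Int) - pvFirst ys x :=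
          pvDist_append_self_of_mem ys x hx
        have hdx_old : pvDist ys x < (ys.length : Int) - pvFirst ys x := by
          rw [pvDist_def]; omega
        have hsetx : PySem.Set.ofList (ys ++ [x]) = PySem.Set.ofList ys := by
          rw [pvSet_append, if_pos hx]
        simp only [pvBStep, hcont, if_true, hfirstD]
        by_cases hupd : sty.2.2 < (ys.length : Int) - pvFirst ys x
        · -- update branch
          rw [if_pos hupd]
          refine ⟨hH1', by show (0:Int) ≤ (ys.length : Int) - pvFirst ys x; omega, ?_⟩
          have hxset : x ∈ PySem.Set.ofList ys := (PySem.Set.mem_ofList _ _).2 hx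
          obtain ⟨P, S, hPS⟩ := List.append_of_mem hxset
          have hnd : (P ++ x :: S).Nodup := by
            rw [← hPS]; exact PySem.Set.nodup_ofList ys
          have hxP : x ∉ P := by
            intro hc
            exact (List.nodup_append.mp hnd).2.2 x hc x (by simp) rfl
          have hxS : x ∉ S := by
            have := (List.nodup_append.mp hnd).2.1
            exact (List.nodup_cons.mp this).1
          have hall : ∀ k ∈ PySem.Set.ofList ys, pvDist ys k ≤ sty.2.2 := by
            intro k hk
            rw [hset] at hk
            rcases List.mem_append.1 hk with hk1 | hk2
            · exact le_of_lt (h1 k hk1)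
            · rcases List.mem_cons.1 hk2 with he | hk3
              · rw [he, hbk]
              · exact h2 k hk3
          refine ⟨P, S, ?_, ?_, ?_, ?_⟩
          · rw [hsetx, hPS]
          · intro k hkP
            have hkx : k ≠ x := fun he => hxP (he ▸ hkP)
            have hkset : k ∈ PySem.Set.ofList ys := by rw [hPS]; simp [hkP]
            rw [pvDist_append_of_ne ys x k (fun h' => hkx h'.symm)]
            exact lt_of_le_of_lt (hall k hkset) hupd
          · exact hdx
          · intro k hkS
            have hkx : k ≠ x := fun he => hxS (he ▸ hkS)
            have hkset : k ∈ PySem.Set.ofList ys := by rw [hPS]; simp [hkS]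
            rw [pvDist_append_of_ne ys x k (fun h' => hkx h'.symm)]
            exact le_of_lt (lt_of_le_of_lt (hall k hkset) hupd)
        · -- no update
          rw [if_neg hupd]
          have hxbk : x ≠ sty.2.1 := by
            intro he
            rw [← he] at hbk
            rw [pvDist_def] at hbk
            omega
          have hxK1 : x ∉ K1 := by
            intro hc
            have hpw := pvSet_pairwise_first ys
            rw [hset] at hpw
            have hRlt := (List.pairwise_append.mp hpw).2.2 x hc sty.2.1 (by simp)
            have hbkb := pvLast_bound ys sty.2.1 hbk_mem
            rw [pvDist_def] at hbk
            omega
          refine ⟨hH1', ihbd, K1, K2, by rw [hsetx, hset], ?_, ?_, ?_⟩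
          · intro k hkK1
            have hkx : k ≠ x := fun he => hxK1 (he ▸ hkK1)
            rw [pvDist_append_of_ne ys x k (fun h' => hkx h'.symm)]
            exact h1 k hkK1
          · rw [pvDist_append_of_ne ys x sty.2.1 (fun h' => hxbk h')]
            exact hbk
          · intro k hkK2
            by_cases hkx : k = x
            · rw [hkx, hdx]; omega
            · rw [pvDist_append_of_ne ys x k (fun h' => hkx h'.symm)]
              exact h2 k hkK2
      · -- x fresh
        have hocc_nil : pvOcc ys x = [] := (pvOcc_eq_nil_iff ys x).2 hx
        have hcont : sty.1.contains x = false := by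
          rw [PySem.Dict.contains_eq_isSome_get?, ihH1 x, hocc_nil]
          rfl
        simp only [pvBStep, hcont, Bool.false_eq_true, if_false]
        refine ⟨?_, ihbd, K1, K2 ++ [x], ?_, ?_, ?_, ?_⟩
        · intro k
          by_cases hk : k = x
          · subst hk
            rw [PySem.Dict.get?_insert_self, pvOcc_append_self_of_not_mem ys k hx]
            rfl
          · rw [PySem.Dict.get?_insert_of_ne _ _ hk, ihH1 k,
              pvOcc_append_of_ne ys x k (fun h' => hk h'.symm)]
        · rw [pvSet_append, if_neg hx, hset]
          simp
        · intro k hkK1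
          have hkys : k ∈ ys := by
            have : k ∈ PySem.Set.ofList ys := by rw [hset]; simp [hkK1]
            exact (PySem.Set.mem_ofList _ _).1 this
          have hkx : k ≠ x := fun he => hx (he ▸ hkys)
          rw [pvDist_append_of_ne ys x k (fun h' => hkx h'.symm)]
          exact h1 k hkK1
        · have hbkx : sty.2.1 ≠ x := fun he => hx (he ▸ hbk_mem)
          rw [pvDist_append_of_ne ys x sty.2.1 (fun h' => hbkx h'.symm)]
          exact hbk
        · intro k hk
          rcases List.mem_append.1 hk with hkK2 | hkx
          · have hkys : k ∈ ys := by
              have : k ∈ PySem.Set.ofList ys := by rw [hset]; simp [hkK2]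
              exact (PySem.Set.mem_ofList _ _).1 this
            have hkx : k ≠ x := fun he => hx (he ▸ hkys)
            rw [pvDist_append_of_ne ys x k (fun h' => hkx h'.symm)]
            exact h2 k hkK2
          · have hkx : k = x := by simpa using hkx
            rw [hkx, pvDist_append_self_of_not_mem ys x hx]
            exact ihbd

-- ===== VERDICT (by name: the statement is the Claim_ definition above) =====
theorem MaxDistance2OccurencesElementArray_spec : Claim_equal_MaxDistance2OccurencesElementArray := by
  intro ary _ hpre
  obtain ⟨hH1, hbd0, K1, K2, hset, h1, hbk, h2⟩ := pvB_inv ary (ary.headD 0) hpre rfl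
  have hB : MaxDistance2OccurencesElementArray_alt ary
      = (((PySem.List.enumerate ary).foldl pvBStep (PySem.Dict.empty, ary.headD 0, 0)).2.1,
         ((PySem.List.enumerate ary).foldl pvBStep (PySem.Dict.empty, ary.headD 0, 0)).2.2) := by
    have : PySem.List.pyGetD ary 0 0 = ary.headD 0 := by
      cases ary with
      | nil => exact absurd rfl hpre
      | cons a t => simp [PySem.List.pyGetD_zero_cons]
    simp [MaxDistance2OccurencesElementArray_alt, this]
  unfold Spec_MaxDistance2OccurencesElementArray
  rw [pvA_eq_pick ary hpre, hB,
    pvPick_of_decomp ary _ _ K1 K2 hpre hset h1 hbk h2 hbd0]
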